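-- pv_equiv track=rewrite | github.com/0929shlee/CPP_VoI_DL | shfile.py | get_num_from_string
-- ===== SOURCE A (Python) =====
-- def get_num_from_string(text):
--     res = 0
--     for c in text:
--         if '0' <= c <= '9':
--             res *= 10
--             res += int(c)
--         if c == '/':
--             res = 0
--
--     return res
-- ===== SOURCE B (Python) =====
-- def get_num_from_string(text):
--     tail = text.rsplit('/', 1)[-1]
--     res = 0
--     place = 1
--     for c in reversed(tail):
--         if '0' <= c <= '9':
--             res += (ord(c) - 48) * place
--             place *= 10
--     return res
-- ===== Notes on version B (the rewrite author's own statement) =====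
-- stated objective: alternative
-- what changed: B first isolates the suffix after the last '/' (rsplit), then accumulates its digits right-to-left with an explicit place value, instead of A's single left-to-right Horner loop that resets on every '/'.
import Mathlib
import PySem

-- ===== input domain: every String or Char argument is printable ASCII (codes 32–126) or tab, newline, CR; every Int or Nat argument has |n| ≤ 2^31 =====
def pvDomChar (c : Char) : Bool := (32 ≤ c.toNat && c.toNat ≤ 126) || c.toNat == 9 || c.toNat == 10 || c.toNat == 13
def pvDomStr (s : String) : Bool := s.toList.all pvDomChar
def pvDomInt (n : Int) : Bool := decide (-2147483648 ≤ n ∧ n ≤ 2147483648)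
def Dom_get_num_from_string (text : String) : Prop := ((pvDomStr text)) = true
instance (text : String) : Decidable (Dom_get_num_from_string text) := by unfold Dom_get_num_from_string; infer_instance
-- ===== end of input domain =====

-- B isolates the suffix after the last '/' first and then accumulates the digits
-- right-to-left with an explicit place value (alternative decomposition, no reset-in-loop).


-- ===== PORT A =====
-- for c in text: if digit: res = res*10 + int(c); if c == '/': res = 0
def get_num_from_string (text : String) : Int :=
  text.toList.foldl (fun res c =>
    let res := if '0' ≤ c ∧ c ≤ '9' then res * 10 + ((c.toNat : Int) - 48) else res
    if c = '/' then 0 else res) 0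

-- ===== PORT B =====
-- tail = text.rsplit('/', 1)[-1]  (the suffix of text after the last '/'; exact hand port:
-- reverse, take up to the first '/', reverse back)
-- then for c in reversed(tail): if digit: res += (ord(c)-48)*place; place *= 10
def get_num_from_string_alt (text : String) : Int :=
  let tail := (text.toList.reverse.takeWhile (· ≠ '/')).reverse
  (tail.reverse.foldl (fun (st : Int × Int) c =>
      if '0' ≤ c ∧ c ≤ '9' then (st.1 + ((c.toNat : Int) - 48) * st.2, 10 * st.2) else st)
    (0, 1)).1

-- ===== PRECONDITION & SPEC =====
def Spec_get_num_from_string (text : String) (out : Int) : Prop := out = get_num_from_string_alt text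
instance (text : String) (out : Int) : Decidable (Spec_get_num_from_string text out) := by unfold Spec_get_num_from_string; infer_instance

-- ===== CLAIM (what is proved, stated in full; the proofs are below) =====
def Claim_equal_get_num_from_string : Prop := ∀ (text : String), Dom_get_num_from_string text → Spec_get_num_from_string text (get_num_from_string text)

-- ===== LEMMAS AND PROOFS =====

-- A's loop body
def pvStepA (res : Int) (c : Char) : Int :=
  let res := if '0' ≤ c ∧ c ≤ '9' then res * 10 + ((c.toNat : Int) - 48) else res
  if c = '/' then 0 else res

-- Horner accumulation of the digits of a list (no reset)
def pvHor (r : Int) (l : List Char) : Int :=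
  l.foldl (fun r c => if '0' ≤ c ∧ c ≤ '9' then r * 10 + ((c.toNat : Int) - 48) else r) r

-- B's right-to-left pair accumulation over l (applied to the already-reversed list)
def pvStepB (st : Int × Int) (c : Char) : Int × Int :=
  if '0' ≤ c ∧ c ≤ '9' then (st.1 + ((c.toNat : Int) - 48) * st.2, 10 * st.2) else st

def pvPair (l : List Char) : Int × Int := l.reverse.foldl pvStepB (0, 1)

-- suffix after the last '/'
def pvAfter (l : List Char) : List Char := (l.reverse.takeWhile (· ≠ '/')).reverse

theorem pvPair_cons (c : Char) (l : List Char) : pvPair (c :: l) = pvStepB (pvPair l) c := by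
  simp [pvPair, List.foldl_append]

theorem pvHor_eq_pair (l : List Char) : ∀ r : Int,
    pvHor r l = r * (pvPair l).2 + (pvPair l).1 := by
  induction l with
  | nil => intro r; simp [pvHor, pvPair]
  | cons c l ih =>
    intro r
    rw [pvPair_cons]
    by_cases h : '0' ≤ c ∧ c ≤ '9' <;>
      simp [pvHor, pvStepB, h, List.foldl_cons] <;>
      rw [show (List.foldl (fun r c => if '0' ≤ c ∧ c ≤ '9' then r * 10 + ((c.toNat : Int) - 48) else r) _ l) = pvHor _ l from rfl, ih] <;>
      ring

theorem pvAfter_snoc (l : List Char) (c : Char) :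
    pvAfter (l ++ [c]) = if c = '/' then [] else pvAfter l ++ [c] := by
  by_cases h : c = '/' <;> simp [pvAfter, h]

theorem pvA_fold (l : List Char) : ∀ r : Int,
    l.foldl pvStepA r = pvHor (if '/' ∈ l then 0 else r) (pvAfter l) := by
  induction l using List.reverseRecOn with
  | nil => intro r; simp [pvAfter, pvHor]
  | append_singleton l c ih =>
    intro r
    rw [List.foldl_append, List.foldl_cons, List.foldl_nil, pvAfter_snoc]
    by_cases hc : c = '/'
    · have hd : ¬ ('0' ≤ c ∧ c ≤ '9') := by subst hc; decide
      simp [hc, pvStepA, pvHor]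
    · have hc' : ¬ '/' = c := fun h => hc h.symm
      by_cases hd : '0' ≤ c ∧ c ≤ '9'
      · simp [pvStepA, hd, hc, hc', ih, pvHor, List.foldl_append, List.mem_append]
      · simp [pvStepA, hd, hc, hc', ih, pvHor, List.foldl_append, List.mem_append]

-- ===== VERDICT (by name: the statement is the Claim_ definition above) =====
theorem get_num_from_string_spec : Claim_equal_get_num_from_string := by
  intro text _
  show get_num_from_string text = get_num_from_string_alt text
  have hA : get_num_from_string text = text.toList.foldl pvStepA 0 := rfl
  have hB : get_num_from_string_alt text = (pvPair (pvAfter text.toList)).1 := by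
    simp only [get_num_from_string_alt, pvPair, pvAfter, List.reverse_reverse]
    rfl
  rw [hA, hB, pvA_fold]
  have := pvHor_eq_pair (pvAfter text.toList) (if '/' ∈ text.toList then 0 else 0)
  simpa using this
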